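-- pv_equiv track=rewrite | github.com/Moony-H/Algorithm | Python/Programmers/DP/N으로 표현.py | solution
-- ===== SOURCE A (Python) =====
-- def solution(N, number):
--     answer = -1
--     cache=[]
--
--     for i in range(1,9):
--         cases=set()
--         check=int(str(N)*i)
--         cases.add(check)
--
--         for j in range(0,i-1):
--             for temp1 in cache[j]:
--                 for temp2 in cache[-j-1]:
--                     cases.add(temp1-temp2)
--                     cases.add(temp1+temp2)
--                     cases.add(temp1*temp2)
--                     if temp2!=0:
--                         cases.add(temp1//temp2)
--         if number in cases:
--             answer=i
--             break
--         cache.append(cases)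
--     return answer
-- ===== SOURCE B (Python) =====
-- def solution(N, number):
--     memo = {}
--
--     def dp(i):
--         if i in memo:
--             return memo[i]
--         vals = {int(str(N) * i)}
--         for a in range(1, i):
--             for t1 in dp(a):
--                 for t2 in dp(i - a):
--                     vals.add(t1 - t2)
--                     vals.add(t1 + t2)
--                     vals.add(t1 * t2)
--                     if t2 != 0:
--                         vals.add(t1 // t2)
--         memo[i] = vals
--         return vals
--
--     for i in range(1, 9):
--         if number in dp(i):
--             return i
--     return -1
-- ===== Notes on version B (the rewrite author's own statement) =====
-- stated objective: alternative
-- what changed: A's bottom-up loop that appends per-level sets to a cache list and pairs them via negative indexing (cache[j] with cache[-j-1]) is replaced by a top-down memoized recursion dp(i) over the splits a + (i - a), with a dict memo keyed by the copy count.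
import Mathlib
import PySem

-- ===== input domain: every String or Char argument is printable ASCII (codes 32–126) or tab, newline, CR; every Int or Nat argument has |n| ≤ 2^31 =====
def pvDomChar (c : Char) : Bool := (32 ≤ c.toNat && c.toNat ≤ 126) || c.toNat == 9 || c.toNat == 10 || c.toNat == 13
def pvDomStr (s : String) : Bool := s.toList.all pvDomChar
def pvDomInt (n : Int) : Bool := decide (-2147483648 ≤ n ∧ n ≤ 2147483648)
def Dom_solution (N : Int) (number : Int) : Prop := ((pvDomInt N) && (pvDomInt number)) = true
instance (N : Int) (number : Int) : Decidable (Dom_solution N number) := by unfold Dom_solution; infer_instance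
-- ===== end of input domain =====

-- B replaces A's bottom-up cache-list loop (with negative-index pairing) by a top-down
-- memoized recursion dp(i) over splits a + (i-a); objective: alternative decomposition, same values.

-- shared helpers (identical Python lines in A and B):
-- int(str(N)*i); exact where Python does not raise (Pre_ below); .getD is never reached under Pre_
def repNum (N : Int) (i : Int) : Int :=
  (PySem.Int.ofChars? (PySem.List.pyRepeat (PySem.Int.toChars N) i)).getD 0

-- cases.add(t1-t2); cases.add(t1+t2); cases.add(t1*t2); if t2!=0: cases.add(t1//t2)
def combStep (cases : PySem.Set Int) (t1 t2 : Int) : PySem.Set Int :=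
  let c := PySem.Set.add (PySem.Set.add (PySem.Set.add cases (t1 - t2)) (t1 + t2)) (t1 * t2)
  if t2 ≠ 0 then PySem.Set.add c (PySem.Int.floordiv t1 t2) else c

-- 'for t1 in s1: for t2 in s2: <combStep>' (result is a Set, so iteration order is immaterial)
def pairLoop (s1 s2 : PySem.Set Int) (cases : PySem.Set Int) : PySem.Set Int :=
  s1.foldl (fun c t1 => s2.foldl (fun c t2 => combStep c t1 t2) c) cases

-- ===== PORT A =====
-- the body of A's outer loop for one i: cases = {int(str(N)*i)}; for j in range(0,i-1): pair cache[j] with cache[-j-1]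
def casesA (N : Int) (i : Int) (cache : List (PySem.Set Int)) : PySem.Set Int :=
  (PySem.List.pyRange 0 (i - 1) 1).foldl
    (fun cs j =>
      pairLoop (PySem.List.pyGetD cache j PySem.Set.empty)
               (PySem.List.pyGetD cache (-j - 1) PySem.Set.empty) cs)
    (PySem.Set.add PySem.Set.empty (repNum N i))

-- 'for i in range(1,9): … if number in cases: answer=i; break; cache.append(cases)' / 'return answer' (-1 if no break)
def solGo (N number : Int) : List Int → List (PySem.Set Int) → Int
  | [], _cache => -1
  | i :: rest, cache =>
    let cases := casesA N i cache
    if PySem.Set.contains cases number then i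
    else solGo N number rest (cache ++ [cases])

def solution (N : Int) (number : Int) : Int :=
  solGo N number (PySem.List.pyRange 1 9 1) []

-- ===== PORT B =====
mutual
-- 'for a in range(1, i): for t1 in dp(a): for t2 in dp(i-a): …' (the dict `memo` is threaded through)
def dpSplits (N : Int) (i a : Nat) (vals : PySem.Set Int)
    (memo : PySem.Dict Nat (PySem.Set Int)) : PySem.Set Int × PySem.Dict Nat (PySem.Set Int) :=
  if h : 1 ≤ a ∧ a < i then
    let p1 := dpB N a memo
    let p2 := dpB N (i - a) p1.2
    dpSplits N i (a + 1) (pairLoop p1.1 p2.1 vals) p2.2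
  else (vals, memo)
termination_by (i, i - a + 1)
decreasing_by
  all_goals omega

-- def dp(i): if i in memo: return memo[i]; vals = {int(str(N)*i)}; <splits loop>; memo[i] = vals; return vals
def dpB (N : Int) (i : Nat) (memo : PySem.Dict Nat (PySem.Set Int)) :
    PySem.Set Int × PySem.Dict Nat (PySem.Set Int) :=
  match memo.get? i with
  | some v => (v, memo)
  | none =>
    let p := dpSplits N i 1 (PySem.Set.add PySem.Set.empty (repNum N (i : Int))) memo
    (p.1, p.2.insert i p.1)
termination_by (i, i + 2)
decreasing_by
  all_goals omega
end

-- 'for i in range(1, 9): if number in dp(i): return i' / 'return -1'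
def altGo (N number : Int) : List Int → PySem.Dict Nat (PySem.Set Int) → Int
  | [], _memo => -1
  | i :: rest, memo =>
    let p := dpB N i.toNat memo
    if PySem.Set.contains p.1 number then i else altGo N number rest p.2

def solution_alt (N : Int) (number : Int) : Int :=
  altGo N number (PySem.List.pyRange 1 9 1) PySem.Dict.empty

-- ===== PRECONDITION & SPEC =====
-- Pre_ excludes exactly the inputs on which A raises ValueError: for N < 0, int(str(N)*i) with
-- i ≥ 2 parses '-d…-d…' and fails, which is reached unless number == N stops the loop at i = 1.
def Pre_solution (N : Int) (number : Int) : Prop := 0 ≤ N ∨ number = N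
instance (N : Int) (number : Int) : Decidable (Pre_solution N number) := by
  unfold Pre_solution; infer_instance

def pvWitness_solution : Int × Int := (5, 12)

def Spec_solution (N : Int) (number : Int) (out : Int) : Prop := out = solution_alt N number
instance (N : Int) (number : Int) (out : Int) : Decidable (Spec_solution N number out) := by
  unfold Spec_solution; infer_instance

-- ===== CLAIM (what is proved, stated in full; the proofs are below) =====
def Claim_equal_solution : Prop := ∀ (N : Int) (number : Int), Dom_solution N number →
  Pre_solution N number → Spec_solution N number (solution N number)

-- ===== LEMMAS AND PROOFS =====

-- the reachable-value set for i copies of N, defined by strong recursion via A's per-level body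
def CC (N : Int) (i : Nat) : PySem.Set Int :=
  casesA N (i : Int) ((List.range (i - 1)).attach.map (fun j => CC N (j.1 + 1)))
termination_by i
decreasing_by
  have := j.2; simp [List.mem_range] at this; omega

def Cs (N : Int) (k : Nat) : List (PySem.Set Int) :=
  (List.range k).map (fun j => CC N (j + 1))

def MF (N : Int) : Nat → PySem.Dict Nat (PySem.Set Int)
  | 0 => PySem.Dict.empty
  | k + 1 => (MF N k).insert (k + 1) (CC N (k + 1))

-- the common split fold both per-level bodies reduce to
def F (N : Int) (n : Nat) (as : List Nat) (vals : PySem.Set Int) : PySem.Set Int :=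
  as.foldl (fun v a => pairLoop (CC N a) (CC N (n - a)) v) vals

theorem CC_eq (N : Int) (i : Nat) : CC N i = casesA N (i : Int) (Cs N (i - 1)) := by
  rw [CC, Cs]
  congr 1
  simp

theorem length_Cs (N : Int) (k : Nat) : (Cs N k).length = k := by simp [Cs]

theorem getElem_Cs (N : Int) (k j : Nat) (h : j < k) :
    (Cs N k)[j]'(by simp [Cs]; omega) = CC N (j + 1) := by simp [Cs]

theorem MF_get? (N : Int) (k j : Nat) :
    (MF N k).get? j = if 1 ≤ j ∧ j ≤ k then some (CC N j) else none := by
  induction k with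
  | zero => simp [MF, PySem.Dict.get?_empty]; omega
  | succ k ih =>
    rw [MF, PySem.Dict.get?_insert]
    rcases eq_or_ne j (k + 1) with h | h
    · subst h; rw [if_pos rfl, if_pos (by omega)]
    · rw [if_neg h, ih]
      split_ifs <;> first | rfl | omega

theorem casesA_eq (N : Int) (n : Nat) :
    casesA N (n : Int) (Cs N (n - 1)) =
      F N n (List.range' 1 (n - 1)) (PySem.Set.add PySem.Set.empty (repNum N (n : Int))) := by
  rw [casesA, F, PySem.List.pyRange_one]
  have ht : ((n : Int) - 1 - 0).toNat = n - 1 := by omega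
  rw [ht, List.foldl_map, List.range'_eq_map_range, List.foldl_map]
  apply PySem.List.foldl_congr_mem
  intro acc k hk
  simp only [List.mem_range] at hk
  simp only [zero_add]
  have h1 : PySem.List.pyGetD (Cs N (n - 1)) (k : Int) PySem.Set.empty = CC N (k + 1) := by
    rw [PySem.List.pyGetD_natCast]
    rw [List.getD_eq_getElem?_getD, List.getElem?_eq_getElem (by simp [Cs]; omega)]
    simp [getElem_Cs N (n - 1) k hk]
  have h2 : PySem.List.pyGetD (Cs N (n - 1)) (-(k : Int) - 1) PySem.Set.empty =
      CC N (n - 1 - k) := by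
    have : (-(k : Int) - 1) = -((k + 1 : Nat) : Int) := by push_cast; ring
    rw [this, PySem.List.pyGetD_neg_natCast _ _ _ (by omega) (by rw [length_Cs]; omega)]
    simp only [length_Cs]
    rw [getElem_Cs N (n - 1) (n - 1 - (k + 1)) (by omega)]
    congr 1
    omega
  rw [h1, h2]
  have h3 : n - (1 + k) = n - 1 - k := by omega
  rw [h3, Nat.add_comm 1 k]

theorem dpB_hit (N : Int) (i : Nat) (memo : PySem.Dict Nat (PySem.Set Int))
    (v : PySem.Set Int) (h : memo.get? i = some v) : dpB N i memo = (v, memo) := by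
  rw [dpB, h]

theorem dpSplits_eq (N : Int) (k : Nat) : ∀ (m i a : Nat) (vals : PySem.Set Int),
    i - a = m → 1 ≤ a → i ≤ k + 1 →
    dpSplits N i a vals (MF N k) = (F N i (List.range' a (i - a)) vals, MF N k) := by
  intro m
  induction m with
  | zero =>
    intro i a vals hm ha hi
    rw [dpSplits]
    rw [dif_neg (by omega)]
    rw [hm]
    simp [F]
  | succ m ih =>
    intro i a vals hm ha hi
    have hlt : a < i := by omega
    rw [dpSplits, dif_pos ⟨ha, hlt⟩]
    have hget1 : (MF N k).get? a = some (CC N a) := by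
      rw [MF_get?]; rw [if_pos (by omega)]
    have hget2 : (MF N k).get? (i - a) = some (CC N (i - a)) := by
      rw [MF_get?]; rw [if_pos (by omega)]
    simp only [dpB_hit N a _ _ hget1, dpB_hit N (i - a) _ _ hget2]
    rw [ih i (a + 1) _ (by omega) (by omega) hi]
    have hr : List.range' a (i - a) = a :: List.range' (a + 1) (i - (a + 1)) := by
      have h1 : i - a = (i - (a + 1)) + 1 := by omega
      rw [h1, List.range'_succ]
    rw [hr]
    simp only [F, List.foldl_cons]

theorem dpB_top (N : Int) (k : Nat) :
    dpB N (k + 1) (MF N k) = (CC N (k + 1), MF N (k + 1)) := by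
  have hnone : (MF N k).get? (k + 1) = none := by
    rw [MF_get?]; rw [if_neg (by omega)]
  have hcc : CC N (k + 1) = F N (k + 1) (List.range' 1 (k + 1 - 1))
      (PySem.Set.add PySem.Set.empty (repNum N ((k + 1 : Nat) : Int))) := by
    rw [CC_eq, casesA_eq]
  rw [dpB, hnone]
  simp only [dpSplits_eq N k (k + 1 - 1) (k + 1) 1 _ rfl (by omega) (by omega)]
  rw [← hcc, MF]

theorem Cs_succ (N : Int) (k : Nat) : Cs N (k + 1) = Cs N k ++ [CC N (k + 1)] := by
  simp [Cs, List.range_succ]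

theorem go_eq (N number : Int) : ∀ (r k : Nat),
    solGo N number ((List.range' (k + 1) r).map Int.ofNat) (Cs N k) =
      altGo N number ((List.range' (k + 1) r).map Int.ofNat) (MF N k) := by
  intro r
  induction r with
  | zero => intro k; rfl
  | succ r ih =>
    intro k
    rw [List.range'_succ, List.map_cons]
    rw [solGo, altGo]
    have hcases : casesA N (Int.ofNat (k + 1)) (Cs N k) = CC N (k + 1) := by
      have := CC_eq N (k + 1)
      simpa using this.symm
    have htn : (Int.ofNat (k + 1)).toNat = k + 1 := by simp
    rw [hcases, htn, dpB_top]
    cases hc : PySem.Set.contains (CC N (k + 1)) number with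
    | true => simp only [if_true]
    | false =>
      simp only [Bool.false_eq_true, if_false]
      rw [← Cs_succ]
      exact ih (k + 1)

theorem ports_agree (N number : Int) : solution N number = solution_alt N number := by
  rw [solution, solution_alt]
  have h : PySem.List.pyRange 1 9 1 = (List.range' 1 8).map Int.ofNat := by decide
  rw [h]
  have h0 : ([] : List (PySem.Set Int)) = Cs N 0 := by rfl
  have h1 : (PySem.Dict.empty : PySem.Dict Nat (PySem.Set Int)) = MF N 0 := by rfl
  rw [h0, h1]
  exact go_eq N number 8 0

-- ===== VERDICT (by name: the statement is the Claim_ definition above) =====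
theorem solution_spec : Claim_equal_solution := by
  intro N number _hdom _hpre
  unfold Spec_solution
  exact ports_agree N number
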